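-- pv_equiv track=rewrite | github.com/FlaBBB/Cybers_security | tools/globfuscator.py | asterisk_conv
-- ===== SOURCE A (Python) =====
-- def asterisk_conv(in_string: str, seed: int) -> str:
--     if seed < 1:
--         return in_string
--
--     x = 1
--     for i in list(range(1, len(in_string) + 1))[::-1]:
--         if seed > i:
--             seed -= i
--             x += 1
--         else:
--             break
--     return in_string[:seed - 1] + "*" + in_string[seed - 1 + x:]
-- ===== SOURCE B (Python) =====
-- def asterisk_conv(in_string: str, seed: int) -> str:
--     if seed < 1:
--         return in_string
--     n = len(in_string)
--     # binary search the least k in [0, n] with (k+1)*(2n-k) >= 2*seed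
--     # (the partial sums n + (n-1) + ... + (n-k+1) + (n-k) are monotone)
--     lo, hi = 0, n
--     while lo < hi:
--         mid = (lo + hi) // 2
--         if (mid + 1) * (2 * n - mid) >= 2 * seed:
--             hi = mid
--         else:
--             lo = mid + 1
--     k = lo
--     s2 = seed - (k * n - k * (k - 1) // 2)
--     x = 1 + k
--     return in_string[:s2 - 1] + "*" + in_string[s2 - 1 + x:]
-- ===== Notes on version B (the rewrite author's own statement) =====
-- stated objective: faster
-- what changed: A finds the slice position by linearly subtracting n, n-1, ... from seed in a countdown loop; B binary-searches the monotone triangular partial sums for the subtraction count k and computes the remaining seed in closed form (seed - (k*n - k*(k-1)//2)).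
import Mathlib
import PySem

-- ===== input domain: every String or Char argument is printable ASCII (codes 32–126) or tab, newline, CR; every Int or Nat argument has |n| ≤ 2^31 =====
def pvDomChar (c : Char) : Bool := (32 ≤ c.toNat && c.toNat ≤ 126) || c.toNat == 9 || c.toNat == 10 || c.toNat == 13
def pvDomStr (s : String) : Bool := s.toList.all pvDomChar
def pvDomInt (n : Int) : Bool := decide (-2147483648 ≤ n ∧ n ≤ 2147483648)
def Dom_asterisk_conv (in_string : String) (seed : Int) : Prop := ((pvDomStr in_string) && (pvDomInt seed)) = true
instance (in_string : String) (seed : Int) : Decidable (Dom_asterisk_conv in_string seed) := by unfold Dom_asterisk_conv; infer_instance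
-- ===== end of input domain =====

-- B replaces A's linear countdown loop by a binary search on the (monotone)
-- triangular partial sums, finding the subtraction count directly (objective: faster).


-- ===== PORT A =====
-- the 'for i in …: if seed > i: … else: break' loop, carrying (seed, x)
def pvLoopA : List Int → Int → Int → Int × Int
  | [], s, x => (s, x)
  | i :: rest, s, x => if s > i then pvLoopA rest (s - i) (x + 1) else (s, x)

def asterisk_conv (in_string : String) (seed : Int) : String :=
  if seed < 1 then in_string
  else
    -- list(range(1, len(in_string)+1))[::-1]  (step -1 ≠ 0, so slice? is always some)
    let idxs := (PySem.List.slice? (PySem.List.pyRange 1 (PySem.Str.len in_string + 1) 1) none none (-1)).getD []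
    let p := pvLoopA idxs seed 1
    PySem.Str.slice in_string none (some (p.1 - 1)) ++ "*" ++
      PySem.Str.slice in_string (some (p.1 - 1 + p.2)) none

-- ===== PORT B =====
-- least k in [lo, hi] with (k+1)*(2n-k) ≥ 2*seed (the while-loop of Source B)
def pvBsearch (n seed lo hi : Int) : Int :=
  if h : lo < hi then
    let mid := PySem.Int.floordiv (lo + hi) 2
    if (mid + 1) * (2 * n - mid) ≥ 2 * seed then pvBsearch n seed lo mid
    else pvBsearch n seed (mid + 1) hi
  else lo
termination_by (hi - lo).toNat
decreasing_by
  · have hlt : PySem.Int.floordiv (lo + hi) 2 < hi :=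
      (PySem.Int.floordiv_lt_iff_lt_mul (by omega)).2 (by omega)
    omega
  · have hb := PySem.Int.floordiv_two_mid_bounds (le_of_lt h)
    have hlt : PySem.Int.floordiv (lo + hi) 2 < hi :=
      (PySem.Int.floordiv_lt_iff_lt_mul (by omega)).2 (by omega)
    omega

def asterisk_conv_alt (in_string : String) (seed : Int) : String :=
  if seed < 1 then in_string
  else
    let n := PySem.Str.len in_string
    let k := pvBsearch n seed 0 n
    let s2 := seed - (k * n - PySem.Int.floordiv (k * (k - 1)) 2)
    let x := 1 + k
    PySem.Str.slice in_string none (some (s2 - 1)) ++ "*" ++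
      PySem.Str.slice in_string (some (s2 - 1 + x)) none

-- ===== PRECONDITION & SPEC =====
def Spec_asterisk_conv (in_string : String) (seed : Int) (out : String) : Prop := out = asterisk_conv_alt in_string seed
instance (in_string : String) (seed : Int) (out : String) : Decidable (Spec_asterisk_conv in_string seed out) := by unfold Spec_asterisk_conv; infer_instance

-- ===== CLAIM (what is proved, stated in full; the proofs are below) =====
def Claim_equal_asterisk_conv : Prop := ∀ (in_string : String) (seed : Int), Dom_asterisk_conv in_string seed → Spec_asterisk_conv in_string seed (asterisk_conv in_string seed)

-- ===== LEMMAS AND PROOFS =====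

-- reference recursion: (final seed, number of subtractions) for length m
def pvCnt2 : Nat → Int → Int × Int
  | 0, s => (s, 0)
  | m + 1, s =>
    if s > (m : Int) + 1 then
      let p := pvCnt2 m (s - ((m : Int) + 1))
      (p.1, p.2 + 1)
    else (s, 0)

-- the descending list [m, m-1, …, 1]
def pvDesc : Nat → List Int
  | 0 => []
  | m + 1 => ((m : Int) + 1) :: pvDesc m

lemma pvRange_rev (m : Nat) :
    (PySem.List.pyRange 1 ((m : Int) + 1) 1).reverse = pvDesc m := by
  induction m with
  | zero => simp [pvDesc, PySem.List.pyRange_one_eq_nil]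
  | succ m ih =>
    have h : (1 : Int) ≤ (m : Int) + 1 := by omega
    rw [show ((m + 1 : Nat) : Int) + 1 = ((m : Int) + 1) + 1 by push_cast; ring,
        PySem.List.pyRange_one_succ_right h]
    simp [pvDesc, ih]

lemma pvLoop_cnt (m : Nat) : ∀ (s x : Int),
    pvLoopA (pvDesc m) s x = ((pvCnt2 m s).1, x + (pvCnt2 m s).2) := by
  induction m with
  | zero =>
    intro s x
    simp only [pvDesc, pvCnt2, pvLoopA]
    simp
  | succ m ih =>
    intro s x
    by_cases h : s > (m : Int) + 1
    · simp only [pvDesc, pvCnt2, pvLoopA, if_pos h, ih]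
      ring_nf
    · simp [pvDesc, pvCnt2, pvLoopA, h]

-- characterisation of pvCnt2: its count is the least k with 2s ≤ (k+1)(2m-k), capped at m,
-- and the final seed drops by the triangular sum.
lemma pvCnt2_char (m : Nat) : ∀ s : Int,
    0 ≤ (pvCnt2 m s).2 ∧ (pvCnt2 m s).2 ≤ (m : Int) ∧
    (∀ j : Int, 0 ≤ j → j < (pvCnt2 m s).2 → (j + 1) * (2 * (m : Int) - j) < 2 * s) ∧
    ((pvCnt2 m s).2 = (m : Int) ∨ 2 * s ≤ ((pvCnt2 m s).2 + 1) * (2 * (m : Int) - (pvCnt2 m s).2)) ∧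
    2 * (s - (pvCnt2 m s).1) = (pvCnt2 m s).2 * (2 * (m : Int) + 1 - (pvCnt2 m s).2) := by
  induction m with
  | zero =>
    intro s
    simp only [pvCnt2]
    refine ⟨le_refl 0, le_refl 0, ?_, Or.inl rfl, by ring⟩
    intro j hj0 hj
    omega
  | succ m ih =>
    intro s
    by_cases h : s > (m : Int) + 1
    · obtain ⟨h0, hle, hlt, hok, hsum⟩ := ih (s - ((m : Int) + 1))
      set p := pvCnt2 m (s - ((m : Int) + 1)) with hp
      simp only [pvCnt2, if_pos h, ← hp]
      push_cast
      refine ⟨by omega, by omega, ?_, ?_, by nlinarith⟩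
      · intro j hj0 hj
        rcases eq_or_lt_of_le hj0 with h0j | h0j
        · nlinarith
        · have hlt' := hlt (j - 1) (by omega) (by omega)
          nlinarith
      · rcases hok with hok | hok
        · left; omega
        · right; nlinarith
    · simp only [pvCnt2, if_neg h]
      push_cast
      refine ⟨by norm_num, by omega, by intro j hj0 hj; omega, Or.inr (by nlinarith), by ring⟩

-- monotonicity of k ↦ (k+1)(2n-k) on [0, n]
lemma pvOk_mono (n s a b : Int) (_ha : 0 ≤ a) (hab : a ≤ b) (hb : b ≤ n)
    (h : 2 * s ≤ (a + 1) * (2 * n - a)) : 2 * s ≤ (b + 1) * (2 * n - b) := by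
  rcases eq_or_lt_of_le hab with rfl | hlt
  · exact h
  · nlinarith [mul_nonneg (by omega : (0:Int) ≤ b - a) (by omega : (0:Int) ≤ 2 * n - (a + b + 1))]

lemma pvBsearch_char (n s : Int) : ∀ (d : Nat) (lo hi : Int), (hi - lo).toNat = d →
    0 ≤ lo → lo ≤ hi → hi ≤ n →
    (∀ j : Int, 0 ≤ j → j < lo → (j + 1) * (2 * n - j) < 2 * s) →
    (hi = n ∨ 2 * s ≤ (hi + 1) * (2 * n - hi)) →
    0 ≤ pvBsearch n s lo hi ∧ pvBsearch n s lo hi ≤ n ∧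
    (∀ j : Int, 0 ≤ j → j < pvBsearch n s lo hi → (j + 1) * (2 * n - j) < 2 * s) ∧
    (pvBsearch n s lo hi = n ∨
      2 * s ≤ (pvBsearch n s lo hi + 1) * (2 * n - pvBsearch n s lo hi)) := by
  intro d
  induction d using Nat.strong_induction_on with
  | _ d ihd =>
    intro lo hi hd hlo0 hlohi hhin hlow hhigh
    rw [pvBsearch]
    by_cases h : lo < hi
    · rw [dif_pos h]
      have hb := PySem.Int.floordiv_two_mid_bounds (le_of_lt h)
      have hmid : PySem.Int.floordiv (lo + hi) 2 < hi :=
        (PySem.Int.floordiv_lt_iff_lt_mul (by omega)).2 (by omega)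
      set mid := PySem.Int.floordiv (lo + hi) 2 with hm
      by_cases hok : (mid + 1) * (2 * n - mid) ≥ 2 * s
      · rw [if_pos hok]
        exact ihd (mid - lo).toNat (by omega) lo mid rfl hlo0 (by omega) (by omega)
          hlow (Or.inr hok)
      · rw [if_neg hok]
        refine ihd (hi - (mid + 1)).toNat (by omega) (mid + 1) hi rfl (by omega) (by omega)
          hhin ?_ hhigh
        intro j hj0 hj
        by_contra hc
        push Not at hc
        exact hok (pvOk_mono n s j mid hj0 (by omega) (by omega) hc)
    · rw [dif_neg h]
      have : lo = hi := by omega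
      subst this
      exact ⟨hlo0, hhin, hlow, hhigh⟩

-- the characterisation pins the value down uniquely
lemma pvChar_unique (n s k1 k2 : Int)
    (h1 : 0 ≤ k1 ∧ k1 ≤ n ∧ (∀ j : Int, 0 ≤ j → j < k1 → (j + 1) * (2 * n - j) < 2 * s) ∧
      (k1 = n ∨ 2 * s ≤ (k1 + 1) * (2 * n - k1)))
    (h2 : 0 ≤ k2 ∧ k2 ≤ n ∧ (∀ j : Int, 0 ≤ j → j < k2 → (j + 1) * (2 * n - j) < 2 * s) ∧
      (k2 = n ∨ 2 * s ≤ (k2 + 1) * (2 * n - k2))) : k1 = k2 := by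
  obtain ⟨h10, h1n, h1lt, h1ok⟩ := h1
  obtain ⟨h20, h2n, h2lt, h2ok⟩ := h2
  rcases lt_trichotomy k1 k2 with hlt | heq | hlt
  · rcases h1ok with rfl | hok
    · omega
    · exact absurd hok (not_le.2 (h2lt k1 h10 hlt))
  · exact heq
  · rcases h2ok with rfl | hok
    · omega
    · exact absurd hok (not_le.2 (h1lt k2 h20 hlt))

-- ===== VERDICT (by name: the statement is the Claim_ definition above) =====
theorem asterisk_conv_spec : Claim_equal_asterisk_conv := by
  intro in_string seed _
  unfold Spec_asterisk_conv asterisk_conv asterisk_conv_alt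
  by_cases hs : seed < 1
  · simp [hs]
  · simp only [if_neg hs]
    set m : Nat := in_string.toList.length with hmm
    have hlen : PySem.Str.len in_string = (m : Int) := by
      simp [PySem.Str.len_eq, hmm]
    rw [hlen, PySem.List.slice?_none_none_neg_one]
    simp only [Option.getD_some]
    rw [pvRange_rev m, pvLoop_cnt m seed 1]
    -- identify the binary-search result with pvCnt2's count
    obtain ⟨h0, hle, hlt, hok, hsum⟩ := pvCnt2_char m seed
    have hbs := pvBsearch_char (m : Int) seed ((m : Int) - 0).toNat 0 (m : Int) rfl
      (le_refl 0) (by omega) (le_refl _) (by intro j hj0 hj; omega) (Or.inl rfl)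
    have hk : pvBsearch (m : Int) seed 0 (m : Int) = (pvCnt2 m seed).2 :=
      pvChar_unique (m : Int) seed _ _
        ⟨hbs.1, hbs.2.1, hbs.2.2.1, hbs.2.2.2⟩ ⟨h0, hle, hlt, hok⟩
    rw [hk]
    -- the closed-form seed equals pvCnt2's final seed
    set k := (pvCnt2 m seed).2 with hkdef
    obtain ⟨t, ht⟩ : ∃ t : Int, k * (k - 1) = 2 * t := by
      rcases Int.even_mul_succ_self (k - 1) with ⟨t, ht⟩
      exact ⟨t, by linarith [ht]⟩
    have hfd : PySem.Int.floordiv (k * (k - 1)) 2 = t := by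
      rw [ht, (PySem.Int.floordiv_eq_iff_of_pos (by omega))]
      omega
    have hs2 : seed - (k * (m : Int) - PySem.Int.floordiv (k * (k - 1)) 2) =
        (pvCnt2 m seed).1 := by
      rw [hfd]; nlinarith
    rw [hs2]
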